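-- pv_equiv track=rewrite | github.com/wyk18703232953/myResearch | codeComplex/data/filteredData/python/cubic/python_cubic_0573.py | solve
-- ===== SOURCE A (Python) =====
-- def get_smallest(m, l):
--     res = ''
--     for i in "0123456789":
--         if m.get(i, 0):
--             if i == l:
--                 res += i * (m[i] - 1)
--
--             else:
--                 res += i * m[i]
--     return res
--
-- def solve(a, b):
--     if len(a) < len(b):
--         a = sorted(a)
--         a.reverse()
--         return ''.join(a)
--     elif a == b:
--         return a
--
--     else:
--         cmap = dict()
--         for i in a:
--             cmap[i] = cmap.get(i, 0) + 1
--
--         cur = 0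
--         res = ''
--         gm = False
--
--         while cur < len(a):
--             for i in "9876543210":
--                 if cmap.get(i, 0):
--                     if cur == len(a) - 1 or i < b[cur] or gm:
--                         res += i
--                         cmap[i] -= 1
--                         gm = True
--                         break
--                     elif i == b[cur]:
--                         if get_smallest(cmap, i) <= b[cur + 1:]:
--                             res += i
--                             cmap[i] -= 1
--                             break
--             cur += 1
--
--         return res
-- ===== SOURCE B (Python) =====
-- def solve(a, b):
--     if len(a) < len(b):
--         return ''.join(sorted(a, reverse=True))
--     if a == b:
--         return a
--     cnt = {d: a.count(d) for d in "0123456789"}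
--     n = len(b)
--     p = 0
--     while p < n and b[p] in cnt and cnt[b[p]] > 0:
--         cnt[b[p]] -= 1
--         p += 1
--     if p == n:
--         return b
--     j = p
--     while True:
--         for d in "9876543210":
--             if cnt[d] > 0 and d < b[j]:
--                 cnt[d] -= 1
--                 return b[:j] + d + ''.join(e * cnt[e] for e in "9876543210")
--         if j == 0:
--             return ''
--         j -= 1
--         cnt[b[j]] += 1
-- ===== Notes on version B (the rewrite author's own statement) =====
-- stated objective: faster
-- what changed: A greedily scans 9..0 at every position and rebuilds the smallest remaining string (get_smallest) for each lookahead test; B instead walks b once consuming matching digits from a count table, then backtracks from the first failing position to the last place where a smaller digit is available and appends the remaining digits in descending order.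
-- outside the precondition, e.g. on solve('98', '1'): A returns '9', B returns ''; on solve('87', '15'): A returns '8', B returns ''; on solve('1x', '19'): A returns '1', B returns ''
import Mathlib
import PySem

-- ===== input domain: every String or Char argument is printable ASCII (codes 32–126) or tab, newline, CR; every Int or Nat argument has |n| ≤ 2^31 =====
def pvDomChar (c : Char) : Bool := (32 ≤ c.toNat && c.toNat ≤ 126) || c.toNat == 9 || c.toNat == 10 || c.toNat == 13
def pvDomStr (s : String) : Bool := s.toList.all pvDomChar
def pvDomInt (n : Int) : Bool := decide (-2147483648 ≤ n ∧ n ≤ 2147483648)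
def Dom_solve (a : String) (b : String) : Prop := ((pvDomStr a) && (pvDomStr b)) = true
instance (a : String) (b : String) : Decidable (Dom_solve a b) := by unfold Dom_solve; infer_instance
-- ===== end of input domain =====

-- B replaces A's per-position rebuild of the smallest remaining string (quadratic greedy) by a
-- forward tight pass over b plus a single backtrack (measured faster); equivalence is proved on
-- the natural domain stated in Pre_solve.

-- Python's `s <= t` on strings (code-point lexicographic); shared helper
def pyLe (s t : List Char) : Bool := !decide (t < s)

def digitsAsc : List Char := "0123456789".toList
def digitsDesc : List Char := "9876543210".toList

-- ===== PORT A =====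
def get_smallest (m : PySem.Dict Char Int) (l : Char) : List Char :=
  digitsAsc.foldl (fun res i =>
    if m.getD i 0 ≠ 0 then
      if i = l then res ++ PySem.List.pyRepeat [i] (m.getD i 0 - 1)
      else res ++ PySem.List.pyRepeat [i] (m.getD i 0)
    else res) []

-- the inner `for i in "9876543210": ... break` of A's while-loop
def solveScan (bl : List Char) (n cur : Nat) (gm : Bool) (cmap : PySem.Dict Char Int) :
    List Char → Option (Char × PySem.Dict Char Int × Bool)
  | [] => none
  | i :: rest =>
    if cmap.getD i 0 ≠ 0 then
      if cur = n - 1 ∨ i < PySem.List.pyGetD bl (cur : Int) ' ' ∨ gm = true then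
        some (i, cmap.modify i 0 (· - 1), true)
      else if i = PySem.List.pyGetD bl (cur : Int) ' ' then
        if pyLe (get_smallest cmap i) (PySem.List.slice bl (some ((cur : Int) + 1)) none) = true then
          some (i, cmap.modify i 0 (· - 1), gm)
        else solveScan bl n cur gm cmap rest
      else solveScan bl n cur gm cmap rest
    else solveScan bl n cur gm cmap rest

-- A's `while cur < len(a)` loop
def solveLoop (bl : List Char) (n : Nat) (cmap : PySem.Dict Char Int) (gm : Bool)
    (res : List Char) (cur : Nat) : List Char :=
  if h : cur < n then
    match solveScan bl n cur gm cmap digitsDesc with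
    | some (c, m', g') => solveLoop bl n m' g' (res ++ [c]) (cur + 1)
    | none => solveLoop bl n cmap gm res (cur + 1)
  else res
  termination_by n - cur

def solve (a : String) (b : String) : String :=
  if a.toList.length < b.toList.length then
    String.ofList ((PySem.List.sorted a.toList (fun x => x) false).reverse)
  else if a = b then a
  else
    let cmap := a.toList.foldl (fun d i => d.insert i (d.getD i 0 + 1)) PySem.Dict.empty
    String.ofList (solveLoop b.toList a.toList.length cmap false [] 0)

-- ===== PORT B =====
-- first digit d (scanning 9..0) with cnt[d] > 0 and d < c
def altPick (cnt : PySem.Dict Char Int) (c : Char) : List Char → Option Char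
  | [] => none
  | d :: rest => if 0 < cnt.getD d 0 ∧ d < c then some d else altPick cnt c rest

-- ''.join(e * cnt[e] for e in "9876543210")
def altDesc (cnt : PySem.Dict Char Int) : List Char :=
  digitsDesc.foldl (fun r e => r ++ PySem.List.pyRepeat [e] (cnt.getD e 0)) []

-- the backtracking `while True` loop
def altBack (bl : List Char) (cnt : PySem.Dict Char Int) (j : Nat) : List Char :=
  match altPick cnt (PySem.List.pyGetD bl (j : Int) ' ') digitsDesc with
  | some d => bl.take j ++ d :: altDesc (cnt.modify d 0 (· - 1))
  | none =>
    if _h : j = 0 then []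
    else altBack bl (cnt.modify (PySem.List.pyGetD bl ((j - 1 : Nat) : Int) ' ') 0 (· + 1)) (j - 1)
  termination_by j
  decreasing_by omega

-- the forward tight pass `while p < n and b[p] in cnt and cnt[b[p]] > 0`
def altForward (bl : List Char) (n : Nat) (cnt : PySem.Dict Char Int) (p : Nat) :
    Nat × PySem.Dict Char Int :=
  if h : p < n ∧ cnt.contains (PySem.List.pyGetD bl (p : Int) ' ') = true ∧
      0 < cnt.getD (PySem.List.pyGetD bl (p : Int) ' ') 0 then
    altForward bl n (cnt.modify (PySem.List.pyGetD bl (p : Int) ' ') 0 (· - 1)) (p + 1)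
  else (p, cnt)
  termination_by n - p

def solve_alt (a : String) (b : String) : String :=
  if a.toList.length < b.toList.length then
    String.ofList (PySem.List.sorted a.toList (fun x => x) true)
  else if a = b then a
  else
    let cnt := digitsAsc.foldl (fun d c => d.insert c ((a.toList.count c : Int))) PySem.Dict.empty
    let n := b.toList.length
    let fp := altForward b.toList n cnt 0
    if fp.1 = n then b else String.ofList (altBack b.toList fp.2 fp.1)

-- ===== PRECONDITION & SPEC =====
-- Pre_ restricts to the task's natural domain: either len(a) < len(b) or a == b (always fine), or
-- len(a) == len(b) with both strings made of digits and some digit-permutation of a being ≤ b;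
-- outside it A raises IndexError (len(a) > len(b)+1) or returns truncated garbage (no valid
-- permutation exists, or non-digit characters that A silently drops).
def Pre_solve (a : String) (b : String) : Prop :=
  a.toList.length < b.toList.length ∨ a = b ∨
  (a.toList.length = b.toList.length ∧
   a.toList.all PySem.Chars.isdigit = true ∧ b.toList.all PySem.Chars.isdigit = true ∧
   pyLe (PySem.List.sorted a.toList (fun x => x) false) b.toList = true)
instance (a : String) (b : String) : Decidable (Pre_solve a b) := by unfold Pre_solve; infer_instance

def pvWitness_solve : String × String := ("4321", "4312")

def Spec_solve (a : String) (b : String) (out : String) : Prop := out = solve_alt a b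
instance (a : String) (b : String) (out : String) : Decidable (Spec_solve a b out) := by
  unfold Spec_solve; infer_instance

-- ===== CLAIM (what is proved, stated in full; the proofs are below) =====
def Claim_equal_solve : Prop :=
  ∀ (a : String) (b : String), Dom_solve a b → Pre_solve a b → Spec_solve a b (solve a b)

-- ===== LEMMAS AND PROOFS =====

-- remaining digit counts, abstractly
def cnt2f (m : PySem.Dict Char Int) : Char → Nat := fun c => (m.getD c 0).toNat
def decC (f : Char → Nat) (c : Char) : Char → Nat := fun x => if x = c then f x - 1 else f x
def flat (ds : List Char) (f : Char → Nat) : List Char :=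
  ds.flatMap (fun d => List.replicate (f d) d)
def minrep (f : Char → Nat) : List Char := flat digitsAsc f
def maxrep (f : Char → Nat) : List Char := flat digitsDesc f
def firstAvail (f : Char → Nat) : List Char → Option Char
  | [] => none
  | d :: rest => if 0 < f d then some d else firstAvail f rest
def pickR (f : Char → Nat) (c : Char) : List Char → Option Char
  | [] => none
  | d :: rest => if 0 < f d ∧ d < c then some d else pickR f c rest

-- the common reference algorithm: greedy-with-lookahead over the suffix of b
def G (f : Char → Nat) : List Char → List Char
  | [] => []
  | c :: rest =>
    if 0 < f c ∧ minrep (decC f c) ≤ rest then c :: G (decC f c) rest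
    else
      match pickR f c digitsDesc with
      | some d => d :: maxrep (decC f d)
      | none => []

def NonnegD (m : PySem.Dict Char Int) : Prop := ∀ c, 0 ≤ m.getD c 0
def DigOnly (f : Char → Nat) : Prop := ∀ c, c ∉ digitsAsc → f c = 0
def KeysDig (m : PySem.Dict Char Int) : Prop := ∀ c, m.contains c = true ↔ c ∈ digitsAsc


-- ---------- generic facts about the digit alphabets ----------
theorem digitsAsc_nodup : digitsAsc.Nodup := by decide
theorem digitsDesc_nodup : digitsDesc.Nodup := by decide
theorem digitsAsc_pairwise : digitsAsc.Pairwise (· ≤ ·) := by decide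
theorem digitsDesc_perm : digitsDesc.Perm digitsAsc := by decide
theorem mem_digitsDesc_iff (c : Char) : c ∈ digitsDesc ↔ c ∈ digitsAsc := digitsDesc_perm.mem_iff

theorem digit_mem (c : Char) (h : PySem.Chars.isdigit c = true) : c ∈ digitsAsc := by
  simp only [PySem.Chars.isdigit, Bool.and_eq_true, decide_eq_true_eq] at h
  obtain ⟨h1, h2⟩ := h
  have h1' : 48 ≤ c.toNat := h1
  have h2' : c.toNat ≤ 57 := h2
  interval_cases h3 : c.toNat <;>
    · have hc : c = Char.ofNat c.toNat := (Char.ofNat_toNat c).symm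
      rw [h3] at hc
      subst hc
      decide


theorem digit_split (c : Char) (hc : c ∈ digitsAsc) :
    ∃ hi lo, digitsDesc = hi ++ c :: lo ∧ (∀ d ∈ hi, c < d) ∧ (∀ d ∈ lo, d < c) ∧
      (∀ d, d ∈ digitsDesc → d < c → d ∈ lo) := by
  have h : c = '0' ∨ c = '1' ∨ c = '2' ∨ c = '3' ∨ c = '4' ∨ c = '5' ∨ c = '6' ∨ c = '7' ∨ c = '8' ∨ c = '9' := by
    simpa [digitsAsc] using hc
  obtain h|h|h|h|h|h|h|h|h|h := h <;> subst h
  · exact ⟨"987654321".toList, "".toList, by decide, by simp, by simp,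
      by intro d hd hlt; simp [digitsDesc] at hd
         rcases hd with h|h|h|h|h|h|h|h|h|h <;> subst h <;> revert hlt <;> decide⟩
  · exact ⟨"98765432".toList, "0".toList, by decide, by simp, by simp,
      by intro d hd hlt; simp [digitsDesc] at hd
         rcases hd with h|h|h|h|h|h|h|h|h|h <;> subst h <;> revert hlt <;> decide⟩
  · exact ⟨"9876543".toList, "10".toList, by decide, by simp, by simp,
      by intro d hd hlt; simp [digitsDesc] at hd
         rcases hd with h|h|h|h|h|h|h|h|h|h <;> subst h <;> revert hlt <;> decide⟩
  · exact ⟨"987654".toList, "210".toList, by decide, by simp, by simp,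
      by intro d hd hlt; simp [digitsDesc] at hd
         rcases hd with h|h|h|h|h|h|h|h|h|h <;> subst h <;> revert hlt <;> decide⟩
  · exact ⟨"98765".toList, "3210".toList, by decide, by simp, by simp,
      by intro d hd hlt; simp [digitsDesc] at hd
         rcases hd with h|h|h|h|h|h|h|h|h|h <;> subst h <;> revert hlt <;> decide⟩
  · exact ⟨"9876".toList, "43210".toList, by decide, by simp, by simp,
      by intro d hd hlt; simp [digitsDesc] at hd
         rcases hd with h|h|h|h|h|h|h|h|h|h <;> subst h <;> revert hlt <;> decide⟩
  · exact ⟨"987".toList, "543210".toList, by decide, by simp, by simp,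
      by intro d hd hlt; simp [digitsDesc] at hd
         rcases hd with h|h|h|h|h|h|h|h|h|h <;> subst h <;> revert hlt <;> decide⟩
  · exact ⟨"98".toList, "6543210".toList, by decide, by simp, by simp,
      by intro d hd hlt; simp [digitsDesc] at hd
         rcases hd with h|h|h|h|h|h|h|h|h|h <;> subst h <;> revert hlt <;> decide⟩
  · exact ⟨"9".toList, "76543210".toList, by decide, by simp, by simp,
      by intro d hd hlt; simp [digitsDesc] at hd
         rcases hd with h|h|h|h|h|h|h|h|h|h <;> subst h <;> revert hlt <;> decide⟩
  · exact ⟨"".toList, "876543210".toList, by decide, by simp, by simp,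
      by intro d hd hlt; simp [digitsDesc] at hd
         rcases hd with h|h|h|h|h|h|h|h|h|h <;> subst h <;> revert hlt <;> decide⟩

-- ---------- order lemmas ----------
theorem pyLe_iff (s t : List Char) : pyLe s t = true ↔ s ≤ t := by
  simp [pyLe, not_lt]

theorem lt_of_prefix_lt (u v w : List Char) {c d : Char} (h : d < c) :
    u ++ d :: v < u ++ c :: w := by
  show List.Lex (· < ·) _ _
  exact List.Lex.append_left _ (List.Lex.rel h) u

theorem nil_le_list (w : List Char) : ([] : List Char) ≤ w := by
  refine le_of_not_gt (fun h => ?_)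
  have h' : List.Lex (· < ·) w [] := h
  cases h'

theorem cons_le_cons_list (x : Char) {v w : List Char} (h : v ≤ w) : x :: v ≤ x :: w := by
  rcases lt_or_eq_of_le h with hlt | heq
  · exact le_of_lt (by show List.Lex (· < ·) _ _; exact List.Lex.cons hlt)
  · subst heq; exact le_refl _

theorem le_any_perm_of_pairwise :
    ∀ (v w : List Char), v.Pairwise (· ≤ ·) → w.Perm v → v ≤ w := by
  intro v
  induction v with
  | nil => intro w _ _; exact nil_le_list w
  | cons x v' ih =>
    intro w hp hperm
    match w with
    | [] => exact absurd hperm.symm.length_eq (by simp)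
    | y :: w' =>
      have hy : y ∈ x :: v' := hperm.mem_iff.mp (List.mem_cons_self ..)
      have hxy : x ≤ y := by
        rcases List.mem_cons.mp hy with h | h
        · exact le_of_eq h.symm
        · exact (List.rel_of_pairwise_cons hp) h
      rcases lt_or_eq_of_le hxy with hlt | heq
      · exact le_of_lt (by show List.Lex (· < ·) _ _; exact List.Lex.rel hlt)
      · subst heq
        exact cons_le_cons_list x (ih w' hp.of_cons hperm.cons_inv)
-- ---------- flat / minrep / maxrep ----------
theorem flat_nil_of_zero {ds : List Char} {f : Char → Nat} (h : ∀ d ∈ ds, f d = 0) :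
    flat ds f = [] := by
  induction ds with
  | nil => rfl
  | cons d r ih =>
    simp only [flat, List.flatMap_cons] at *
    rw [h d (List.mem_cons_self ..), ih (fun e he => h e (List.mem_cons_of_mem _ he))]
    rfl

theorem firstAvail_none {f : Char → Nat} :
    ∀ {ds : List Char}, firstAvail f ds = none → ∀ d ∈ ds, f d = 0
  | [], _, d, hd => by cases hd
  | e :: r, h, d, hd => by
    by_cases he : 0 < f e
    · simp [firstAvail, he] at h
    · rcases List.mem_cons.mp hd with rfl | hr
      · omega
      · exact firstAvail_none (by simpa [firstAvail, he] using h) d hr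

theorem firstAvail_some {f : Char → Nat} :
    ∀ {ds : List Char} {m : Char}, firstAvail f ds = some m → 0 < f m ∧ m ∈ ds
  | [], m, h => by cases h
  | e :: r, m, h => by
    by_cases he : 0 < f e
    · simp only [firstAvail, if_pos he, Option.some.injEq] at h
      subst h; exact ⟨he, List.mem_cons_self ..⟩
    · have := firstAvail_some (f := f) (ds := r) (m := m) (by simpa [firstAvail, he] using h)
      exact ⟨this.1, List.mem_cons_of_mem _ this.2⟩

theorem flat_head {f : Char → Nat} :
    ∀ {ds : List Char} {m : Char}, ds.Nodup → firstAvail f ds = some m →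
      flat ds f = m :: flat ds (decC f m)
  | [], m, _, h => by cases h
  | e :: r, m, hnd, h => by
    by_cases he : 0 < f e
    · simp only [firstAvail, if_pos he, Option.some.injEq] at h
      subst m
      have hrm : flat r (decC f e) = flat r f := by
        apply List.flatMap_congr
        intro x hx
        have hxm : x ≠ e := fun hxe => (List.nodup_cons.mp hnd).1 (hxe ▸ hx)
        simp [decC, hxm]
      simp only [flat, List.flatMap_cons] at *
      rw [hrm]
      have hfe : f e = (f e - 1) + 1 := by omega
      rw [hfe, List.replicate_succ]
      simp [decC]
    · have h' : firstAvail f r = some m := by simpa [firstAvail, he] using h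
      have hm := firstAvail_some h'
      have hem : e ≠ m := fun hem => he (hem ▸ hm.1)
      simp only [flat, List.flatMap_cons]
      have hfe : f e = 0 := by omega
      have : decC f m e = 0 := by simp [decC, hem, hfe]
      rw [hfe, this]
      simp only [List.replicate_zero, List.nil_append]
      exact flat_head (List.nodup_cons.mp hnd).2 h'

theorem flat_length {ds : List Char} {f : Char → Nat} :
    (flat ds f).length = (ds.map f).sum := by
  simp [flat, List.length_flatMap, Function.comp]

theorem flat_count {x : Char} :
    ∀ {ds : List Char} {f : Char → Nat}, ds.Nodup →
      (flat ds f).count x = if x ∈ ds then f x else 0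
  | [], f, _ => by simp [flat]
  | e :: r, f, hnd => by
    simp only [flat, List.flatMap_cons, List.count_append]
    have ih := flat_count (x := x) (ds := r) (f := f) (List.nodup_cons.mp hnd).2
    simp only [flat] at ih
    rw [ih]
    by_cases hx : x = e
    · subst hx
      have hxr : x ∉ r := (List.nodup_cons.mp hnd).1
      simp [List.count_replicate, hxr]
    · have hcnt : List.count x (List.replicate (f e) e) = 0 := by
        simp [List.count_replicate, hx, Ne.symm hx]
      rw [hcnt]
      simp only [List.mem_cons]
      by_cases hxr : x ∈ r <;> simp [hxr, hx]

theorem flat_pairwise :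
    ∀ {ds : List Char} {f : Char → Nat}, ds.Pairwise (· ≤ ·) →
      (flat ds f).Pairwise (· ≤ ·)
  | [], f, _ => by simp [flat]
  | e :: r, f, hp => by
    simp only [flat, List.flatMap_cons]
    rw [List.pairwise_append]
    refine ⟨?_, flat_pairwise (hp.of_cons), ?_⟩
    · rcases List.pairwise_replicate.mpr (Or.inr (le_refl e)) with h
      exact h
    · intro a ha b hb
      have ha' : a = e := List.eq_of_mem_replicate ha
      subst ha'
      have : ∃ d ∈ r, b ∈ List.replicate (f d) d := List.mem_flatMap.mp hb
      obtain ⟨d, hd, hbd⟩ := this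
      have : b = d := List.eq_of_mem_replicate hbd
      subst this
      exact List.rel_of_pairwise_cons hp hd

theorem mem_flat {x : Char} {ds : List Char} {f : Char → Nat} (h : x ∈ flat ds f) : x ∈ ds := by
  obtain ⟨d, hd, hxd⟩ := List.mem_flatMap.mp h
  rwa [List.eq_of_mem_replicate hxd]

theorem minrep_pairwise (f : Char → Nat) : (minrep f).Pairwise (· ≤ ·) :=
  flat_pairwise digitsAsc_pairwise

theorem maxrep_length_eq (f : Char → Nat) : (maxrep f).length = (minrep f).length := by
  show (flat digitsDesc f).length = (flat digitsAsc f).length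
  rw [flat_length, flat_length]
  exact (digitsDesc_perm.map f).sum_eq

theorem minrep_count (x : Char) (f : Char → Nat) :
    (minrep f).count x = if x ∈ digitsAsc then f x else 0 := by
  show (flat digitsAsc f).count x = _
  exact flat_count digitsAsc_nodup

theorem sum_map_decC {c : Char} {f : Char → Nat} (h : 0 < f c) :
    ∀ {ds : List Char}, ds.Nodup → c ∈ ds →
      (ds.map (decC f c)).sum + 1 = (ds.map f).sum
  | [], _, hc => by cases hc
  | e :: r, hnd, hc => by
    simp only [List.map_cons, List.sum_cons]
    rcases List.mem_cons.mp hc with rfl | hcr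
    · have : c ∉ r := (List.nodup_cons.mp hnd).1
      have hmap : r.map (decC f c) = r.map f := by
        apply List.map_congr_left
        intro x hx
        have : x ≠ c := fun he => (he ▸ ‹c ∉ r›) hx
        simp [decC, this]
      rw [hmap]
      have hd : decC f c c = f c - 1 := by simp [decC]
      rw [hd]
      omega
    · have hce : c ≠ e := fun he => (List.nodup_cons.mp hnd).1 (he ▸ hcr)
      have : decC f c e = f e := by simp [decC, Ne.symm hce]
      rw [this]
      have hrec := sum_map_decC h (ds := r) (List.nodup_cons.mp hnd).2 hcr
      omega

theorem minrep_length_decC {c : Char} {f : Char → Nat} (hc : c ∈ digitsAsc) (h : 0 < f c) :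
    (minrep (decC f c)).length + 1 = (minrep f).length := by
  show (flat digitsAsc (decC f c)).length + 1 = (flat digitsAsc f).length
  rw [flat_length, flat_length]
  exact sum_map_decC h digitsAsc_nodup hc

-- ---------- pickR ----------
theorem pickR_skip {f : Char → Nat} {c : Char} {hi : List Char} (h : ∀ d ∈ hi, ¬ d < c)
    (t : List Char) : pickR f c (hi ++ t) = pickR f c t := by
  induction hi with
  | nil => rfl
  | cons e r ih =>
    simp only [List.cons_append, pickR]
    rw [if_neg (fun hc => (h e (List.mem_cons_self ..)) hc.2)]
    exact ih (fun d hd => h d (List.mem_cons_of_mem _ hd))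

theorem pickR_some {f : Char → Nat} {c : Char} :
    ∀ {ds : List Char} {d : Char}, pickR f c ds = some d → 0 < f d ∧ d < c ∧ d ∈ ds
  | [], d, h => by cases h
  | e :: r, d, h => by
    by_cases he : 0 < f e ∧ e < c
    · simp only [pickR, if_pos he, Option.some.injEq] at h
      subst h; exact ⟨he.1, he.2, List.mem_cons_self ..⟩
    · have := pickR_some (ds := r) (d := d) (by simpa [pickR, he] using h)
      exact ⟨this.1, this.2.1, List.mem_cons_of_mem _ this.2.2⟩

theorem pickR_isSome {f : Char → Nat} {c d0 : Char} :
    ∀ {ds : List Char}, d0 ∈ ds → 0 < f d0 → d0 < c → ∃ d, pickR f c ds = some d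
  | [], hd, _, _ => by cases hd
  | e :: r, hd, h0, hlt => by
    by_cases he : 0 < f e ∧ e < c
    · exact ⟨e, by simp [pickR, he]⟩
    · rcases List.mem_cons.mp hd with rfl | hr
      · exact absurd ⟨h0, hlt⟩ he
      · obtain ⟨d, hd'⟩ := pickR_isSome hr h0 hlt
        exact ⟨d, by simpa [pickR, he] using hd'⟩

theorem decC_self (f : Char → Nat) (c : Char) : decC f c c = f c - 1 := by simp [decC]
theorem decC_other (f : Char → Nat) {c x : Char} (h : x ≠ c) : decC f c x = f x := by
  simp [decC, h]
-- ---------- dictionaries and abstract counts ----------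
theorem cnt2f_modify_dec {m : PySem.Dict Char Int} {c : Char} (h : 0 < m.getD c 0) :
    cnt2f (m.modify c 0 (· - 1)) = decC (cnt2f m) c := by
  funext x
  by_cases hx : x = c
  · subst hx
    rw [decC_self]
    simp only [cnt2f, PySem.Dict.getD_modify_self]
    omega
  · rw [decC_other _ hx]
    simp only [cnt2f, PySem.Dict.getD_modify_of_ne _ _ _ hx]

theorem cnt2f_modify_inc {m : PySem.Dict Char Int} {c : Char} (h : 0 ≤ m.getD c 0) :
    cnt2f (m.modify c 0 (· + 1)) = fun x => if x = c then cnt2f m x + 1 else cnt2f m x := by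
  funext x
  by_cases hx : x = c
  · subst hx
    rw [if_pos rfl]
    simp only [cnt2f, PySem.Dict.getD_modify_self]
    omega
  · rw [if_neg hx]
    simp only [cnt2f, PySem.Dict.getD_modify_of_ne _ _ _ hx]

theorem nonneg_modify_dec {m : PySem.Dict Char Int} {c : Char} (h : 0 < m.getD c 0)
    (hn : NonnegD m) : NonnegD (m.modify c 0 (· - 1)) := by
  intro x
  by_cases hx : x = c
  · subst hx; simp only [PySem.Dict.getD_modify_self]; omega
  · simp only [PySem.Dict.getD_modify_of_ne _ _ _ hx]; exact hn x

theorem nonneg_modify_inc {m : PySem.Dict Char Int} {c : Char} (hn : NonnegD m) :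
    NonnegD (m.modify c 0 (· + 1)) := by
  intro x
  by_cases hx : x = c
  · subst hx; simp only [PySem.Dict.getD_modify_self]; have := hn x; omega
  · simp only [PySem.Dict.getD_modify_of_ne _ _ _ hx]; exact hn x

theorem keysdig_modify {m : PySem.Dict Char Int} {c : Char} (hk : KeysDig m)
    (hc : c ∈ digitsAsc) (f : Int → Int) : KeysDig (m.modify c 0 f) := by
  intro x
  rw [PySem.Dict.contains_modify]
  constructor
  · intro h
    rcases Bool.or_eq_true_iff.mp h with h | h
    · exact (beq_iff_eq.mp h) ▸ hc
    · exact (hk x).mp h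
  · intro h
    exact Bool.or_eq_true_iff.mpr (Or.inr ((hk x).mpr h))

theorem pos_getD_of_cnt2f {m : PySem.Dict Char Int} (hn : NonnegD m) {c : Char}
    (h : 0 < cnt2f m c) : 0 < m.getD c 0 := by
  have := hn c
  simp only [cnt2f] at h
  omega

theorem cnt2f_pos_iff {m : PySem.Dict Char Int} (hn : NonnegD m) (c : Char) :
    0 < cnt2f m c ↔ 0 < m.getD c 0 := by
  have := hn c; simp only [cnt2f]; omega

-- ---------- ports expressed through the abstract counts ----------
theorem altPick_eq {m : PySem.Dict Char Int} (hn : NonnegD m) (c : Char) :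
    ∀ ds, altPick m c ds = pickR (cnt2f m) c ds
  | [] => rfl
  | d :: r => by
    have hiff : (0 < m.getD d 0 ∧ d < c) ↔ (0 < cnt2f m d ∧ d < c) := by
      rw [cnt2f_pos_iff hn]
    simp only [altPick, pickR]
    by_cases h : 0 < m.getD d 0 ∧ d < c
    · rw [if_pos h, if_pos (hiff.mp h)]
    · rw [if_neg h, if_neg (fun hh => h (hiff.mpr hh))]
      exact altPick_eq hn c r

theorem foldl_rep_eq_flat {m : PySem.Dict Char Int} (hn : NonnegD m) (ds : List Char) :
    ds.foldl (fun r e => r ++ PySem.List.pyRepeat [e] (m.getD e 0)) [] = flat ds (cnt2f m) := by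
  have hfun : (fun (r : List Char) e => r ++ PySem.List.pyRepeat [e] (m.getD e 0)) =
      fun r e => r ++ List.replicate (cnt2f m e) e := by
    funext r e
    rw [PySem.List.pyRepeat_singleton]
    rfl
  rw [hfun, PySem.List.foldl_append_eq_flatMap]
  rfl

theorem altDesc_eq {m : PySem.Dict Char Int} (hn : NonnegD m) :
    altDesc m = maxrep (cnt2f m) := by
  unfold altDesc
  exact foldl_rep_eq_flat hn digitsDesc

theorem get_smallest_eq {m : PySem.Dict Char Int} (hn : NonnegD m) (l : Char) :
    get_smallest m l = minrep (decC (cnt2f m) l) := by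
  unfold get_smallest
  have hfun : (fun (res : List Char) i =>
      if m.getD i 0 ≠ 0 then
        if i = l then res ++ PySem.List.pyRepeat [i] (m.getD i 0 - 1)
        else res ++ PySem.List.pyRepeat [i] (m.getD i 0)
      else res) =
      fun res i => res ++ List.replicate (decC (cnt2f m) l i) i := by
    funext res i
    by_cases hz : m.getD i 0 ≠ 0
    · by_cases hil : i = l
      · subst hil
        rw [if_pos hz, if_pos rfl, PySem.List.pyRepeat_singleton]
        have : (m.getD i 0 - 1).toNat = decC (cnt2f m) i i := by
          rw [decC_self]; simp only [cnt2f]; omega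
        rw [this]
      · rw [if_pos hz, if_neg hil, PySem.List.pyRepeat_singleton]
        have : (m.getD i 0).toNat = decC (cnt2f m) l i := by
          rw [decC_other _ hil]; rfl
        rw [this]
    · rw [if_neg hz]
      push_neg at hz
      have : decC (cnt2f m) l i = 0 := by
        by_cases hil : i = l
        · subst hil; rw [decC_self]; simp [cnt2f, hz]
        · rw [decC_other _ hil]; simp [cnt2f, hz]
      rw [this, List.replicate_zero, List.append_nil]
  rw [hfun, PySem.List.foldl_append_eq_flatMap]
  rfl

theorem cnt2f_modify_inc_apply {m : PySem.Dict Char Int} {c : Char} (h : 0 ≤ m.getD c 0)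
    (x : Char) :
    cnt2f (m.modify c 0 (· + 1)) x = if x = c then cnt2f m x + 1 else cnt2f m x := by
  rw [cnt2f_modify_inc h]
-- ---------- characterizing A's inner scan ----------
theorem scan_free (bl : List Char) (n cur : Nat) (gm : Bool) {m : PySem.Dict Char Int}
    (hn : NonnegD m) (hfree : gm = true ∨ cur = n - 1) :
    ∀ ds, solveScan bl n cur gm m ds =
      (firstAvail (cnt2f m) ds).map (fun d => (d, m.modify d 0 (· - 1), true))
  | [] => rfl
  | d :: r => by
    by_cases hd : m.getD d 0 ≠ 0
    · have hcond : cur = n - 1 ∨ d < PySem.List.pyGetD bl (cur : Int) ' ' ∨ gm = true := by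
        rcases hfree with h | h
        · exact Or.inr (Or.inr h)
        · exact Or.inl h
      have hav : 0 < cnt2f m d := by have := hn d; simp only [cnt2f]; omega
      simp only [solveScan, if_pos hd, if_pos hcond, firstAvail, if_pos hav, Option.map_some]
    · have hav : ¬ 0 < cnt2f m d := by
        have h0 : m.getD d 0 = 0 := by omega
        simp only [cnt2f, h0]; omega
      simp only [solveScan, if_neg hd, firstAvail, if_neg hav]
      exact scan_free bl n cur gm hn hfree r

theorem scan_skip (bl : List Char) (n cur : Nat) {m : PySem.Dict Char Int} {c : Char}
    (hcur : ¬ cur = n - 1) (hc : PySem.List.pyGetD bl (cur : Int) ' ' = c) :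
    ∀ (hi : List Char), (∀ d ∈ hi, c < d) → ∀ t,
      solveScan bl n cur false m (hi ++ t) = solveScan bl n cur false m t
  | [], _, t => rfl
  | e :: r, hhi, t => by
    have hce : c < e := hhi e (List.mem_cons_self ..)
    have hrec := scan_skip bl n cur (m := m) hcur hc r (fun d hd => hhi d (List.mem_cons_of_mem _ hd)) t
    by_cases hd : m.getD e 0 ≠ 0
    · have hcond : ¬ (cur = n - 1 ∨ e < PySem.List.pyGetD bl (cur : Int) ' ' ∨ false = true) := by
        rw [hc]
        push_neg
        exact ⟨hcur, le_of_lt hce, by simp⟩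
      have hne : ¬ e = PySem.List.pyGetD bl (cur : Int) ' ' := by
        rw [hc]; exact (ne_of_gt hce)
      simp only [List.cons_append, solveScan, if_pos hd, if_neg hcond, if_neg hne]
      exact hrec
    · simp only [List.cons_append, solveScan, if_neg hd]
      exact hrec

theorem scan_lt (bl : List Char) (n cur : Nat) {m : PySem.Dict Char Int} {c : Char}
    (hn : NonnegD m) (hcur : ¬ cur = n - 1) (hc : PySem.List.pyGetD bl (cur : Int) ' ' = c) :
    ∀ ds, (∀ d ∈ ds, d < c) →
      solveScan bl n cur false m ds =
        (pickR (cnt2f m) c ds).map (fun d => (d, m.modify d 0 (· - 1), true))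
  | [], _ => rfl
  | d :: r, hds => by
    have hdc : d < c := hds d (List.mem_cons_self ..)
    have hrec := scan_lt bl n cur hn hcur hc r (fun e he => hds e (List.mem_cons_of_mem _ he))
    by_cases hd : m.getD d 0 ≠ 0
    · have hcond : cur = n - 1 ∨ d < PySem.List.pyGetD bl (cur : Int) ' ' ∨ false = true :=
        Or.inr (Or.inl (hc ▸ hdc))
      have hav : 0 < cnt2f m d ∧ d < c := by
        refine ⟨?_, hdc⟩
        have := hn d; simp only [cnt2f]; omega
      simp only [solveScan, if_pos hd, if_pos hcond, pickR, if_pos hav, Option.map_some]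
    · have hav : ¬ (0 < cnt2f m d ∧ d < c) := by
        have h0 : m.getD d 0 = 0 := by omega
        simp only [cnt2f, h0]
        omega
      simp only [solveScan, if_neg hd, pickR, if_neg hav]
      exact hrec

theorem scan_at_c (bl : List Char) (n cur : Nat) {m : PySem.Dict Char Int} {c : Char}
    (hn : NonnegD m) (hcur : ¬ cur = n - 1) (hc : PySem.List.pyGetD bl (cur : Int) ' ' = c)
    (lo : List Char) (hlo : ∀ d ∈ lo, d < c) :
    solveScan bl n cur false m (c :: lo) =
      if m.getD c 0 ≠ 0 ∧
          pyLe (get_smallest m c) (PySem.List.slice bl (some ((cur : Int) + 1)) none) = true then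
        some (c, m.modify c 0 (· - 1), false)
      else (pickR (cnt2f m) c lo).map (fun d => (d, m.modify d 0 (· - 1), true)) := by
  by_cases hd : m.getD c 0 ≠ 0
  · have hcond : ¬ (cur = n - 1 ∨ c < PySem.List.pyGetD bl (cur : Int) ' ' ∨ false = true) := by
      rw [hc]
      push_neg
      exact ⟨hcur, le_refl c, by simp⟩
    have heq : c = PySem.List.pyGetD bl (cur : Int) ' ' := hc.symm
    simp only [solveScan, if_pos hd, if_neg hcond, if_pos heq]
    by_cases ht : pyLe (get_smallest m c) (PySem.List.slice bl (some ((cur : Int) + 1)) none) = true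
    · rw [if_pos ht, if_pos ⟨hd, ht⟩]
    · rw [if_neg ht, if_neg (fun hh => ht hh.2)]
      exact scan_lt bl n cur hn hcur hc lo hlo
  · rw [if_neg (fun hh => hd hh.1)]
    simp only [solveScan, if_neg hd]
    exact scan_lt bl n cur hn hcur hc lo hlo

theorem solveLoop_eq (bl : List Char) (n : Nat) (m : PySem.Dict Char Int) (gm : Bool)
    (res : List Char) (cur : Nat) :
    solveLoop bl n m gm res cur =
      if _h : cur < n then
        match solveScan bl n cur gm m digitsDesc with
        | some (c, m', g') => solveLoop bl n m' g' (res ++ [c]) (cur + 1)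
        | none => solveLoop bl n m gm res (cur + 1)
      else res := by
  rw [solveLoop]

-- ---------- A's loop once gm is set: it appends the remaining digits, largest first ----------
theorem loop_gm : ∀ (k : Nat) (bl : List Char) (n cur : Nat) (m : PySem.Dict Char Int)
    (res : List Char), NonnegD m → (minrep (cnt2f m)).length = k → cur + k = n →
    solveLoop bl n m true res cur = res ++ maxrep (cnt2f m)
  | 0, bl, n, cur, m, res, hn, hlen, hcn => by
    rw [solveLoop_eq, dif_neg (by omega)]
    have hall : ∀ d ∈ digitsDesc, cnt2f m d = 0 := by
      intro d _
      have hz := List.length_eq_zero_iff.mp hlen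
      by_contra hne
      have hpos : 0 < cnt2f m d := by omega
      have : firstAvail (cnt2f m) digitsAsc ≠ none := by
        intro hnone
        exact absurd (firstAvail_none hnone d (mem_digitsDesc_iff d |>.mp ‹d ∈ digitsDesc›)) (by omega)
      cases hfa : firstAvail (cnt2f m) digitsAsc with
      | none => exact this hfa
      | some e =>
        have := flat_head (f := cnt2f m) digitsAsc_nodup hfa
        rw [show flat digitsAsc (cnt2f m) = minrep (cnt2f m) from rfl, hz] at this
        cases this
    rw [show maxrep (cnt2f m) = flat digitsDesc (cnt2f m) from rfl,
      flat_nil_of_zero hall, List.append_nil]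
  | k + 1, bl, n, cur, m, res, hn, hlen, hcn => by
    rw [solveLoop_eq, dif_pos (by omega)]
    cases hfa : firstAvail (cnt2f m) digitsDesc with
    | none =>
      exfalso
      have hall : ∀ d ∈ digitsAsc, cnt2f m d = 0 := by
        intro d hd
        exact firstAvail_none hfa d ((mem_digitsDesc_iff d).mpr hd)
      have : minrep (cnt2f m) = [] := flat_nil_of_zero hall
      rw [this] at hlen
      simp at hlen
    | some d =>
      rw [scan_free bl n cur true hn (Or.inl rfl) digitsDesc, hfa]
      simp only [Option.map_some]
      have hd := firstAvail_some hfa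
      have hdA : d ∈ digitsAsc := (mem_digitsDesc_iff d).mp hd.2
      have hpos : 0 < m.getD d 0 := pos_getD_of_cnt2f hn hd.1
      have hdec := cnt2f_modify_dec hpos
      have hlen' : (minrep (cnt2f (m.modify d 0 (· - 1)))).length = k := by
        rw [hdec]
        have := minrep_length_decC hdA hd.1
        omega
      rw [loop_gm k bl n (cur + 1) _ _ (nonneg_modify_dec hpos hn) hlen' (by omega)]
      rw [hdec, List.append_assoc]
      congr 1
      exact (flat_head digitsDesc_nodup hfa).symm

theorem solveLoop_step_some {bl : List Char} {n cur : Nat} {gm : Bool}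
    {m m' : PySem.Dict Char Int} {c : Char} {g' : Bool} (res : List Char)
    (h : solveScan bl n cur gm m digitsDesc = some (c, m', g')) (hlt : cur < n) :
    solveLoop bl n m gm res cur = solveLoop bl n m' g' (res ++ [c]) (cur + 1) := by
  rw [solveLoop_eq, dif_pos hlt, h]
-- ---------- helper facts for positions in b ----------
theorem getElem?_of_drop {bl : List Char} {cur : Nat} {c : Char} {rest : List Char}
    (h : bl.drop cur = c :: rest) : bl[cur]? = some c := by
  have h0 : (bl.drop cur)[0]? = bl[cur + 0]? := List.getElem?_drop
  rw [h] at h0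
  simpa using h0.symm

theorem pyGetD_of_drop {bl : List Char} {cur : Nat} {c : Char} {rest : List Char}
    (h : bl.drop cur = c :: rest) : PySem.List.pyGetD bl (cur : Int) ' ' = c := by
  rw [PySem.List.pyGetD_natCast, List.getD_eq_getElem?_getD, getElem?_of_drop h]
  rfl

theorem mem_of_drop {bl : List Char} {cur : Nat} {c : Char} {rest : List Char}
    (h : bl.drop cur = c :: rest) : c ∈ bl := by
  have := getElem?_of_drop h
  exact List.mem_of_getElem? this

theorem drop_succ_of_drop {bl : List Char} {cur : Nat} {c : Char} {rest : List Char}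
    (h : bl.drop cur = c :: rest) : bl.drop (cur + 1) = rest := by
  have : bl.drop (cur + 1) = (bl.drop cur).drop 1 := by
    rw [List.drop_drop]
  rw [this, h]
  rfl

theorem slice_succ_of_drop {bl : List Char} {cur : Nat} {c : Char} {rest : List Char}
    (h : bl.drop cur = c :: rest) :
    PySem.List.slice bl (some ((cur : Int) + 1)) none = rest := by
  have hcast : ((cur : Int) + 1) = ((cur + 1 : Nat) : Int) := by push_cast; ring
  rw [hcast, PySem.List.slice_from_natCast, drop_succ_of_drop h]

-- head of minrep is the smallest available digit
theorem minrep_head {f : Char → Nat} {s : List Char} (hlen : (minrep f).length = s.length)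
    (hne : s ≠ []) :
    ∃ m0, firstAvail f digitsAsc = some m0 ∧ minrep f = m0 :: minrep (decC f m0) ∧
      0 < f m0 ∧ m0 ∈ digitsAsc := by
  cases hfa : firstAvail f digitsAsc with
  | none =>
    exfalso
    have : minrep f = [] := flat_nil_of_zero (firstAvail_none hfa)
    rw [this] at hlen
    exact hne (List.length_eq_zero_iff.mp hlen.symm)
  | some m0 =>
    have h := firstAvail_some hfa
    exact ⟨m0, rfl, flat_head digitsAsc_nodup hfa, h.1, h.2⟩

-- any available digit is the unique element when the remaining length is 1
theorem avail_eq_of_len1 {f : Char → Nat} {m0 x : Char}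
    (hm : minrep f = m0 :: minrep (decC f m0)) (hlen : (minrep f).length = 1)
    (hx : x ∈ digitsAsc) (hpos : 0 < f x) : x = m0 := by
  have htl : minrep (decC f m0) = [] := by
    rw [hm] at hlen
    simpa using List.length_eq_zero_iff.mp (by simpa using hlen)
  have hcnt : (minrep f).count x = f x := by
    rw [minrep_count, if_pos hx]
  have hxmem : x ∈ minrep f := by
    rw [← List.count_pos_iff, hcnt]
    exact hpos
  rw [hm, htl] at hxmem
  simpa using hxmem

-- ---------- A's loop equals the reference G ----------
theorem loop_G : ∀ (s bl : List Char) (cur : Nat) (m : PySem.Dict Char Int) (res : List Char),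
    cur + s.length = bl.length → bl.drop cur = s →
    (∀ x ∈ bl, PySem.Chars.isdigit x = true) → NonnegD m →
    (minrep (cnt2f m)).length = s.length → minrep (cnt2f m) ≤ s →
    solveLoop bl bl.length m false res cur = res ++ G (cnt2f m) s
  | [], bl, cur, m, res, hlen, hdrop, hb, hn, hmlen, hle => by
    have hcur : cur = bl.length := by simpa using hlen
    rw [solveLoop_eq, dif_neg (by omega)]
    simp [G]
  | c :: rest, bl, cur, m, res, hlen, hdrop, hb, hn, hmlen, hle => by
    have hcurlt : cur < bl.length := by simp at hlen; omega
    have hget : PySem.List.pyGetD bl (cur : Int) ' ' = c := pyGetD_of_drop hdrop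
    have hcbl : c ∈ bl := mem_of_drop hdrop
    have hcAsc : c ∈ digitsAsc := digit_mem c (hb c hcbl)
    obtain ⟨m0, hfa, hm0, hm0pos, hm0Asc⟩ :=
      minrep_head (f := cnt2f m) hmlen (by simp)
    -- either the smallest available digit is < c, or staying tight is possible
    have hcases : m0 < c ∨ (m0 = c ∧ minrep (decC (cnt2f m) m0) ≤ rest) := by
      rcases lt_or_eq_of_le hle with hlt | heq
      · rw [hm0] at hlt
        have hlt' : List.Lex (· < ·) (m0 :: minrep (decC (cnt2f m) m0)) (c :: rest) := hlt
        cases hlt' with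
        | rel h => exact Or.inl h
        | cons h => exact Or.inr ⟨rfl, le_of_lt h⟩
      · rw [hm0] at heq
        have h1 : m0 = c := by injection heq with h1 h2
        have h2 : minrep (decC (cnt2f m) m0) = rest := by injection heq with h1' h2'
        exact Or.inr ⟨h1, le_of_eq h2⟩
    by_cases hG : 0 < cnt2f m c ∧ minrep (decC (cnt2f m) c) ≤ rest
    · -- tight step: take c and stay in the lookahead mode
      have hpos : 0 < m.getD c 0 := pos_getD_of_cnt2f hn hG.1
      have hGrw : G (cnt2f m) (c :: rest) = c :: G (decC (cnt2f m) c) rest := by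
        simp only [G, if_pos hG]
      cases rest with
      | nil =>
        -- last position: A takes the single remaining digit, which is c
        have hcur1 : cur + 1 = bl.length := by simpa using hlen
        have hc_eq_m0 : c = m0 := avail_eq_of_len1 hm0 (by simpa using hmlen) hcAsc hG.1
        cases hfd : firstAvail (cnt2f m) digitsDesc with
        | none =>
          exfalso
          have := firstAvail_none hfd c ((mem_digitsDesc_iff c).mpr hcAsc)
          omega
        | some d =>
          have hd := firstAvail_some hfd
          have hd_eq : d = m0 :=
            avail_eq_of_len1 hm0 (by simpa using hmlen) ((mem_digitsDesc_iff d).mp hd.2) hd.1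
          have hscan : solveScan bl bl.length cur false m digitsDesc =
              some (c, m.modify c 0 (· - 1), true) := by
            rw [scan_free bl bl.length cur false hn (Or.inr (by omega)) digitsDesc, hfd,
              Option.map_some, hd_eq, ← hc_eq_m0]
          rw [solveLoop_step_some res hscan (by omega), solveLoop_eq, dif_neg (by omega), hGrw]
          rfl
      | cons c2 rest' =>
        have hcur_ne : ¬ cur = bl.length - 1 := by simp at hlen; omega
        obtain ⟨hi, lo, hsplit, hhi, hlo, hloall⟩ := digit_split c hcAsc
        have hcond : m.getD c 0 ≠ 0 ∧
            pyLe (get_smallest m c)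
              (PySem.List.slice bl (some ((cur : Int) + 1)) none) = true := by
          refine ⟨by omega, ?_⟩
          rw [get_smallest_eq hn c, slice_succ_of_drop hdrop, pyLe_iff]
          exact hG.2
        have hscan : solveScan bl bl.length cur false m digitsDesc =
            some (c, m.modify c 0 (· - 1), false) := by
          rw [hsplit, scan_skip bl bl.length cur hcur_ne hget hi hhi _,
            scan_at_c bl bl.length cur hn hcur_ne hget lo hlo, if_pos hcond]
        have hdec := cnt2f_modify_dec hpos
        have hrec := loop_G (c2 :: rest') bl (cur + 1) (m.modify c 0 (· - 1)) (res ++ [c])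
          (by simp at hlen ⊢; omega) (drop_succ_of_drop hdrop) hb
          (nonneg_modify_dec hpos hn)
          (by rw [hdec]; have := minrep_length_decC hcAsc hG.1; simp at hmlen ⊢; omega)
          (by rw [hdec]; exact hG.2)
        rw [solveLoop_step_some res hscan (by omega), hrec, hdec, hGrw, List.append_assoc]
        rfl
    · -- A leaves the tight mode: it takes the largest available digit < c
      have hm0c : m0 < c := by
        rcases hcases with h | ⟨h1, h2⟩
        · exact h
        · exfalso
          subst h1
          exact hG ⟨hm0pos, h2⟩
      obtain ⟨d, hpk⟩ :=
        pickR_isSome (ds := digitsDesc) ((mem_digitsDesc_iff m0).mpr hm0Asc) hm0pos hm0c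
      have hdprops := pickR_some hpk
      have hdAsc : d ∈ digitsAsc := (mem_digitsDesc_iff d).mp hdprops.2.2
      have hdpos : 0 < m.getD d 0 := pos_getD_of_cnt2f hn hdprops.1
      have hGrw : G (cnt2f m) (c :: rest) = d :: maxrep (decC (cnt2f m) d) := by
        simp only [G, if_neg hG, hpk]
      cases rest with
      | nil =>
        have hcur1 : cur + 1 = bl.length := by simpa using hlen
        have hd_eq : d = m0 := avail_eq_of_len1 hm0 (by simpa using hmlen) hdAsc hdprops.1
        cases hfd : firstAvail (cnt2f m) digitsDesc with
        | none =>
          exfalso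
          have := firstAvail_none hfd d ((mem_digitsDesc_iff d).mpr hdAsc)
          omega
        | some e =>
          have he := firstAvail_some hfd
          have he_eq : e = m0 :=
            avail_eq_of_len1 hm0 (by simpa using hmlen) ((mem_digitsDesc_iff e).mp he.2) he.1
          have hscan : solveScan bl bl.length cur false m digitsDesc =
              some (d, m.modify d 0 (· - 1), true) := by
            rw [scan_free bl bl.length cur false hn (Or.inr (by omega)) digitsDesc, hfd,
              Option.map_some, he_eq, ← hd_eq]
          have hmax : maxrep (decC (cnt2f m) d) = [] := by
            have hlen1 : (minrep (decC (cnt2f m) d)).length + 1 = (minrep (cnt2f m)).length :=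
              minrep_length_decC hdAsc hdprops.1
            have : (maxrep (decC (cnt2f m) d)).length = 0 := by
              rw [maxrep_length_eq]
              simp at hmlen
              omega
            exact List.length_eq_zero_iff.mp this
          rw [solveLoop_step_some res hscan (by omega), solveLoop_eq, dif_neg (by omega),
            hGrw, hmax]
      | cons c2 rest' =>
        have hcur_ne : ¬ cur = bl.length - 1 := by simp at hlen; omega
        obtain ⟨hi, lo, hsplit, hhi, hlo, hloall⟩ := digit_split c hcAsc
        have hcond : ¬ (m.getD c 0 ≠ 0 ∧
            pyLe (get_smallest m c)
              (PySem.List.slice bl (some ((cur : Int) + 1)) none) = true) := by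
          rintro ⟨h1, h2⟩
          rw [get_smallest_eq hn c, slice_succ_of_drop hdrop, pyLe_iff] at h2
          have hposc : 0 < cnt2f m c := by
            rw [cnt2f_pos_iff hn]
            have := hn c
            omega
          exact hG ⟨hposc, h2⟩
        have hskip : pickR (cnt2f m) c digitsDesc = pickR (cnt2f m) c lo := by
          have hsplit' : digitsDesc = (hi ++ [c]) ++ lo := by
            rw [hsplit]; simp
          rw [hsplit']
          apply pickR_skip
          intro e he
          rcases List.mem_append.mp he with h | h
          · exact lt_asymm (hhi e h)
          · have : e = c := by simpa using h
            subst this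
            exact lt_irrefl e
        have hscan : solveScan bl bl.length cur false m digitsDesc =
            some (d, m.modify d 0 (· - 1), true) := by
          rw [hsplit, scan_skip bl bl.length cur hcur_ne hget hi hhi _,
            scan_at_c bl bl.length cur hn hcur_ne hget lo hlo, if_neg hcond, ← hskip, hpk,
            Option.map_some]
        have hdec := cnt2f_modify_dec hdpos
        have hgm := loop_gm (minrep (decC (cnt2f m) d)).length bl bl.length (cur + 1)
          (m.modify d 0 (· - 1)) (res ++ [d]) (nonneg_modify_dec hdpos hn)
          (by rw [hdec])
          (by
            have := minrep_length_decC hdAsc hdprops.1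
            simp at hlen hmlen
            omega)
        rw [solveLoop_step_some res hscan (by omega), hgm, hdec, hGrw, List.append_assoc]
        rfl
-- ---------- unfolding the backtracking loop ----------
theorem altBack_some {bl : List Char} {cnt : PySem.Dict Char Int} {j : Nat} {d : Char}
    (h : altPick cnt (PySem.List.pyGetD bl (j : Int) ' ') digitsDesc = some d) :
    altBack bl cnt j = bl.take j ++ d :: altDesc (cnt.modify d 0 (· - 1)) := by
  rw [altBack.eq_def, h]

theorem altBack_none {bl : List Char} {cnt : PySem.Dict Char Int} {j : Nat}
    (h : altPick cnt (PySem.List.pyGetD bl (j : Int) ' ') digitsDesc = none) :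
    altBack bl cnt j =
      if _h : j = 0 then []
      else altBack bl (cnt.modify (PySem.List.pyGetD bl ((j - 1 : Nat) : Int) ' ') 0 (· + 1))
        (j - 1) := by
  rw [altBack.eq_def, h]

-- ---------- positions, segments ----------
theorem pyGetD_at {bl : List Char} {j : Nat} (hj : j < bl.length) :
    PySem.List.pyGetD bl (j : Int) ' ' = bl[j] := by
  rw [PySem.List.pyGetD_natCast, List.getD_eq_getElem?_getD, List.getElem?_eq_getElem hj]
  rfl

theorem take_succ_of_drop {bl : List Char} {cur : Nat} {c : Char} {rest : List Char}
    (h : bl.drop cur = c :: rest) : bl.take (cur + 1) = bl.take cur ++ [c] := by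
  rw [List.take_succ, getElem?_of_drop h]
  rfl

theorem drop_take_self (bl : List Char) (j : Nat) : (bl.take j).drop j = [] :=
  List.drop_eq_nil_of_le (by simpa using List.length_take_le j bl)

theorem seg_succ {bl : List Char} {j cur : Nat} (hj : j < bl.length) (hcj : cur + 1 ≤ j) :
    (bl.take (j + 1)).drop (cur + 1) = (bl.take j).drop (cur + 1) ++ [bl[j]] := by
  rw [List.take_succ, List.getElem?_eq_getElem hj]
  have hlen : cur + 1 ≤ (bl.take j).length := by
    simp [List.length_take]
    omega
  rw [List.drop_append_of_le_length hlen]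
  rfl

theorem drop_split {bl : List Char} {j cur : Nat} (hcj : cur + 1 ≤ j) (hj : j ≤ bl.length) :
    bl.drop (cur + 1) = (bl.take j).drop (cur + 1) ++ bl.drop j := by
  conv_lhs => rw [← List.take_append_drop j bl]
  have hlen : cur + 1 ≤ (bl.take j).length := by
    simp [List.length_take]; omega
  rw [List.drop_append_of_le_length hlen]

theorem digonly_decC {f : Char → Nat} (h : DigOnly f) (c : Char) : DigOnly (decC f c) := by
  intro x hx
  by_cases hxc : x = c
  · subst hxc; rw [decC_self, h x hx]
  · rw [decC_other _ hxc]; exact h x hx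

theorem digonly_of_counts {bl : List Char} {j cur : Nat} {m : PySem.Dict Char Int}
    {f0 : Char → Nat} (hd0 : DigOnly f0)
    (hc : ∀ x, ((bl.take j).drop (cur + 1)).count x + cnt2f m x = f0 x) :
    DigOnly (cnt2f m) := by
  intro x hx
  have := hc x
  rw [hd0 x hx] at this
  omega

-- a witness permutation beats the minimum: the pick cannot succeed above the leave point
theorem pick_fail {bl : List Char} {cur j : Nat} {m : PySem.Dict Char Int} {f0 : Char → Nat}
    (hb : ∀ x ∈ bl, PySem.Chars.isdigit x = true)
    (hn : NonnegD m) (hd0 : DigOnly f0)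
    (hj : j < bl.length) (hcj : cur + 1 ≤ j)
    (hc : ∀ x, ((bl.take j).drop (cur + 1)).count x + cnt2f m x = f0 x)
    (hbad : bl.drop (cur + 1) < minrep f0) :
    pickR (cnt2f m) bl[j] digitsDesc = none := by
  set seg := (bl.take j).drop (cur + 1) with hseg
  have hsegdig : ∀ x ∈ seg, x ∈ digitsAsc := by
    intro x hxs
    exact digit_mem x (hb x (List.mem_of_mem_take (List.mem_of_mem_drop hxs)))
  cases hpk : pickR (cnt2f m) bl[j] digitsDesc with
  | none => rfl
  | some d' =>
    exfalso
    have hd' := pickR_some hpk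
    have hd'Asc : d' ∈ digitsAsc := (mem_digitsDesc_iff d').mp hd'.2.2
    have hposd' : 0 < m.getD d' 0 := pos_getD_of_cnt2f hn hd'.1
    set w := seg ++ d' :: minrep (decC (cnt2f m) d') with hw
    have hdigm : DigOnly (cnt2f m) := digonly_of_counts hd0 hc
    have hperm : w.Perm (minrep f0) := by
      rw [List.perm_iff_count]
      intro a
      rw [minrep_count]
      by_cases ha : a ∈ digitsAsc
      · rw [if_pos ha, hw, List.count_append, List.count_cons, minrep_count, if_pos ha]
        have hca := hc a
        by_cases had : a = d'
        · subst had
          rw [decC_self]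
          have hpos' := hd'.1
          simp only [BEq.rfl, if_true]
          omega
        · rw [decC_other _ had, if_neg (by simp only [beq_iff_eq]; exact Ne.symm had)]
          omega
      · rw [if_neg ha]
        have h1 : a ∉ seg := fun hx => ha (hsegdig a hx)
        have h2 : a ≠ d' := fun he => ha (he ▸ hd'Asc)
        have h3 : a ∉ minrep (decC (cnt2f m) d') := fun hx => ha (mem_flat hx)
        refine List.count_eq_zero.mpr (fun hx => ?_)
        rw [hw] at hx
        rcases List.mem_append.mp hx with h | h
        · exact h1 h
        · rcases List.mem_cons.mp h with h | h
          · exact h2 h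
          · exact h3 h
    have hmin_le : minrep f0 ≤ w := le_any_perm_of_pairwise _ _ (minrep_pairwise f0) hperm
    have hwlt : w < bl.drop (cur + 1) := by
      rw [drop_split hcj (le_of_lt hj), List.drop_eq_getElem_cons hj]
      exact lt_of_prefix_lt seg _ _ hd'.2.1
    exact absurd hbad (not_lt.mpr (le_trans hmin_le (le_of_lt hwlt)))

-- ---------- the backtracking walk comes back to the leave point ----------
theorem back_down {bl : List Char} {cur : Nat} {c d : Char} {forig : Char → Nat}
    (hb : ∀ x ∈ bl, PySem.Chars.isdigit x = true)
    (hdrop : bl.drop cur = c :: bl.drop (cur + 1))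
    (hposc : 0 < forig c)
    (hd0 : DigOnly forig)
    (hpk : pickR forig c digitsDesc = some d)
    (hbad : bl.drop (cur + 1) < minrep (decC forig c)) :
    ∀ (k : Nat) (mj : PySem.Dict Char Int), NonnegD mj → cur + 1 + k < bl.length →
      (∀ x, ((bl.take (cur + 1 + k)).drop (cur + 1)).count x + cnt2f mj x = decC forig c x) →
      altBack bl mj (cur + 1 + k) = bl.take cur ++ d :: maxrep (decC forig d)
  | 0, mj, hn, hjlt, hcnt => by
    have hfail := pick_fail hb hn (digonly_decC hd0 c) hjlt (by omega) hcnt hbad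
    have hget : PySem.List.pyGetD bl (cur : Int) ' ' = c := pyGetD_of_drop hdrop
    rw [altBack_none (by rw [pyGetD_at hjlt, altPick_eq hn _ digitsDesc]; exact hfail),
      dif_neg (by omega : ¬ cur + 1 + 0 = 0)]
    have hidx : cur + 1 + 0 - 1 = cur := by omega
    rw [hidx, hget]
    -- the counts at cur+1 are exactly decC forig c; adding back c restores forig
    have hmjeq : ∀ x, cnt2f mj x = decC forig c x := by
      intro x
      have := hcnt x
      rw [drop_take_self] at this
      simpa using this
    have hrestore : cnt2f (mj.modify c 0 (· + 1)) = forig := by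
      funext x
      rw [cnt2f_modify_inc_apply (hn c) x]
      by_cases hxc : x = c
      · subst hxc
        rw [if_pos rfl, hmjeq x, decC_self]
        omega
      · rw [if_neg hxc, hmjeq x, decC_other _ hxc]
    rw [altBack_some (by
      rw [hget, altPick_eq (nonneg_modify_inc hn) _ digitsDesc, hrestore]; exact hpk)]
    have hdpos : 0 < (mj.modify c 0 (· + 1)).getD d 0 := by
      have h1 : 0 < forig d := (pickR_some hpk).1
      rw [← hrestore] at h1
      exact pos_getD_of_cnt2f (nonneg_modify_inc hn) h1
    rw [altDesc_eq (nonneg_modify_dec hdpos (nonneg_modify_inc hn)),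
      cnt2f_modify_dec hdpos, hrestore]
  | k + 1, mj, hn, hjlt, hcnt => by
    have hfail := pick_fail hb hn (digonly_decC hd0 c) hjlt (by omega) hcnt hbad
    have hprev : cur + 1 + k < bl.length := by omega
    have hpg : PySem.List.pyGetD bl ((cur + 1 + k : Nat) : Int) ' ' = bl[cur + 1 + k] :=
      pyGetD_at hprev
    have harr : cur + 1 + (k + 1) = (cur + 1 + k) + 1 := by omega
    have hseg : (bl.take (cur + 1 + (k + 1))).drop (cur + 1) =
        (bl.take (cur + 1 + k)).drop (cur + 1) ++ [bl[cur + 1 + k]] := by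
      rw [harr]
      exact seg_succ hprev (by omega)
    rw [altBack_none (by rw [pyGetD_at hjlt, altPick_eq hn _ digitsDesc]; exact hfail),
      dif_neg (by omega : ¬ cur + 1 + (k + 1) = 0)]
    have hidx : cur + 1 + (k + 1) - 1 = cur + 1 + k := by omega
    rw [hidx, hpg]
    have hstep : ∀ x, ((bl.take (cur + 1 + k)).drop (cur + 1)).count x +
        cnt2f (mj.modify bl[cur + 1 + k] 0 (· + 1)) x = decC forig c x := by
      intro x
      rw [cnt2f_modify_inc_apply (hn _) x]
      have h1 := hcnt x
      rw [hseg, List.count_append] at h1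
      by_cases hx : x = bl[cur + 1 + k]
      · rw [if_pos hx]
        have h2 : List.count x [bl[cur + 1 + k]] = 1 := by simp [hx]
        rw [h2] at h1
        omega
      · rw [if_neg hx]
        have hz : List.count x [bl[cur + 1 + k]] = 0 := by
          simp [List.count_eq_zero, hx]
        rw [hz] at h1
        omega
    exact back_down hb hdrop hposc hd0 hpk hbad k
      (mj.modify bl[cur + 1 + k] 0 (· + 1)) (nonneg_modify_inc hn) hprev hstep
-- ---------- B's forward pass ----------
theorem altForward_stop {bl : List Char} {n : Nat} {m : PySem.Dict Char Int} {p : Nat}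
    (h : ¬ (p < n ∧ m.contains (PySem.List.pyGetD bl (p : Int) ' ') = true ∧
      0 < m.getD (PySem.List.pyGetD bl (p : Int) ' ') 0)) :
    altForward bl n m p = (p, m) := by
  rw [altForward, dif_neg h]

theorem altForward_step {bl : List Char} {n : Nat} {m : PySem.Dict Char Int} {p : Nat}
    (h : p < n ∧ m.contains (PySem.List.pyGetD bl (p : Int) ' ') = true ∧
      0 < m.getD (PySem.List.pyGetD bl (p : Int) ' ') 0) :
    altForward bl n m p =
      altForward bl n (m.modify (PySem.List.pyGetD bl (p : Int) ' ') 0 (· - 1)) (p + 1) := by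
  rw [altForward, dif_pos h]

theorem fwd_over {bl : List Char} {cur : Nat} {f0 : Char → Nat}
    (hb : ∀ x ∈ bl, PySem.Chars.isdigit x = true) (hd0 : DigOnly f0)
    (hbad : bl.drop (cur + 1) < minrep f0)
    (hlenf0 : (minrep f0).length + (cur + 1) = bl.length) :
    ∀ (s1 : List Char) (cur1 : Nat) (m1 : PySem.Dict Char Int), cur + 1 ≤ cur1 →
      cur1 + s1.length = bl.length → bl.drop cur1 = s1 → NonnegD m1 → KeysDig m1 →
      (∀ x, ((bl.take cur1).drop (cur + 1)).count x + cnt2f m1 x = f0 x) →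
      ∃ p mp, altForward bl bl.length m1 cur1 = (p, mp) ∧ cur1 ≤ p ∧ p < bl.length ∧
        NonnegD mp ∧ KeysDig mp ∧
        (∀ x, ((bl.take p).drop (cur + 1)).count x + cnt2f mp x = f0 x)
  | [], cur1, m1, hge, hlen1, hdrop1, hn1, hk1, hc1 => by
    exfalso
    have hcur1 : cur1 = bl.length := by simpa using hlen1
    have hc1' : ∀ x, (bl.drop (cur + 1)).count x + cnt2f m1 x = f0 x := by
      intro x
      have := hc1 x
      rwa [hcur1, List.take_length] at this
    have hdm1 : DigOnly (cnt2f m1) := by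
      intro x hx
      have := hc1' x
      rw [hd0 x hx] at this
      omega
    have hperm : (bl.drop (cur + 1) ++ minrep (cnt2f m1)).Perm (minrep f0) := by
      rw [List.perm_iff_count]
      intro a
      rw [List.count_append, minrep_count a (cnt2f m1), minrep_count a f0]
      by_cases ha : a ∈ digitsAsc
      · rw [if_pos ha, if_pos ha]
        exact hc1' a
      · rw [if_neg ha, if_neg ha]
        have h1 : a ∉ bl.drop (cur + 1) := fun hx =>
          ha (digit_mem a (hb a (List.mem_of_mem_drop hx)))
        simp [List.count_eq_zero.mpr h1]
    have hlenrest : (bl.drop (cur + 1)).length = (minrep f0).length := by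
      simp only [List.length_drop]
      omega
    have hm1nil : minrep (cnt2f m1) = [] := by
      have := hperm.length_eq
      rw [List.length_append] at this
      have : (minrep (cnt2f m1)).length = 0 := by omega
      exact List.length_eq_zero_iff.mp this
    rw [hm1nil, List.append_nil] at hperm
    exact absurd hbad
      (not_lt.mpr (le_any_perm_of_pairwise _ _ (minrep_pairwise f0) hperm))
  | c1 :: r1, cur1, m1, hge, hlen1, hdrop1, hn1, hk1, hc1 => by
    have hcur1lt : cur1 < bl.length := by simp at hlen1; omega
    have hget1 : PySem.List.pyGetD bl (cur1 : Int) ' ' = c1 := pyGetD_of_drop hdrop1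
    have hc1dig : c1 ∈ digitsAsc := digit_mem _ (hb _ (mem_of_drop hdrop1))
    by_cases hpos1 : 0 < cnt2f m1 c1
    · have hposD : 0 < m1.getD c1 0 := pos_getD_of_cnt2f hn1 hpos1
      have hcond : cur1 < bl.length ∧
          m1.contains (PySem.List.pyGetD bl (cur1 : Int) ' ') = true ∧
          0 < m1.getD (PySem.List.pyGetD bl (cur1 : Int) ' ') 0 := by
        rw [hget1]
        exact ⟨hcur1lt, (hk1 c1).mpr hc1dig, hposD⟩
      have hdec := cnt2f_modify_dec hposD
      have hcnt' : ∀ x, ((bl.take (cur1 + 1)).drop (cur + 1)).count x +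
          cnt2f (m1.modify c1 0 (· - 1)) x = f0 x := by
        intro x
        have hbl : bl[cur1] = c1 := by
          have := getElem?_of_drop hdrop1
          simp [List.getElem?_eq_getElem hcur1lt] at this
          exact this
        rw [seg_succ hcur1lt hge, List.count_append, hdec, hbl]
        have h1 := hc1 x
        by_cases hx : x = c1
        · subst hx
          rw [decC_self]
          simp [List.count_cons]
          omega
        · rw [decC_other _ hx]
          have hz : List.count x [c1] = 0 := by
            simpa [List.count_eq_zero] using hx
          rw [hz]
          omega
      obtain ⟨p, mp, heq, hple, hplt, hnp, hkp, hcp⟩ :=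
        fwd_over hb hd0 hbad hlenf0 r1 (cur1 + 1) (m1.modify c1 0 (· - 1))
          (by omega) (by simp at hlen1 ⊢; omega) (drop_succ_of_drop hdrop1)
          (nonneg_modify_dec hposD hn1) (keysdig_modify hk1 hc1dig _) hcnt'
      refine ⟨p, mp, ?_, by omega, hplt, hnp, hkp, hcp⟩
      rw [altForward_step hcond, hget1]
      exact heq
    · have hcond : ¬ (cur1 < bl.length ∧
          m1.contains (PySem.List.pyGetD bl (cur1 : Int) ' ') = true ∧
          0 < m1.getD (PySem.List.pyGetD bl (cur1 : Int) ' ') 0) := by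
        rintro ⟨_, _, h3⟩
        rw [hget1] at h3
        exact hpos1 ((cnt2f_pos_iff hn1 c1).mpr h3)
      exact ⟨cur1, m1, altForward_stop hcond, le_refl _, hcur1lt, hn1, hk1, hc1⟩

-- ---------- B equals the reference G ----------
theorem alt_G : ∀ (s bl : List Char) (cur : Nat) (m : PySem.Dict Char Int),
    cur + s.length = bl.length → bl.drop cur = s →
    (∀ x ∈ bl, PySem.Chars.isdigit x = true) → NonnegD m → KeysDig m →
    DigOnly (cnt2f m) →
    (minrep (cnt2f m)).length = s.length → minrep (cnt2f m) ≤ s →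
    (if (altForward bl bl.length m cur).1 = bl.length then bl
     else altBack bl (altForward bl bl.length m cur).2 (altForward bl bl.length m cur).1) =
      bl.take cur ++ G (cnt2f m) s
  | [], bl, cur, m, hlen, hdrop, hb, hn, hk, hdg, hmlen, hle => by
    have hcur : cur = bl.length := by simpa using hlen
    have hstop : altForward bl bl.length m cur = (cur, m) :=
      altForward_stop (by rintro ⟨h1, _, _⟩; omega)
    rw [hstop]
    simp only [hcur, if_pos rfl]
    simp [G]
  | c :: rest, bl, cur, m, hlen, hdrop, hb, hn, hk, hdg, hmlen, hle => by
    have hcurlt : cur < bl.length := by simp at hlen; omega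
    have hget : PySem.List.pyGetD bl (cur : Int) ' ' = c := pyGetD_of_drop hdrop
    have hcbl : c ∈ bl := mem_of_drop hdrop
    have hcAsc : c ∈ digitsAsc := digit_mem c (hb c hcbl)
    obtain ⟨m0, hfa, hm0, hm0pos, hm0Asc⟩ :=
      minrep_head (f := cnt2f m) hmlen (by simp)
    have hcases : m0 < c ∨ (m0 = c ∧ minrep (decC (cnt2f m) m0) ≤ rest) := by
      rcases lt_or_eq_of_le hle with hlt | heq
      · rw [hm0] at hlt
        have hlt' : List.Lex (· < ·) (m0 :: minrep (decC (cnt2f m) m0)) (c :: rest) := hlt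
        cases hlt' with
        | rel h => exact Or.inl h
        | cons h => exact Or.inr ⟨rfl, le_of_lt h⟩
      · rw [hm0] at heq
        have h1 : m0 = c := by injection heq with h1 h2
        have h2 : minrep (decC (cnt2f m) m0) = rest := by injection heq with h1' h2'
        exact Or.inr ⟨h1, le_of_eq h2⟩
    by_cases hG : 0 < cnt2f m c ∧ minrep (decC (cnt2f m) c) ≤ rest
    · -- tight step
      have hpos : 0 < m.getD c 0 := pos_getD_of_cnt2f hn hG.1
      have hdec := cnt2f_modify_dec hpos
      have hcond : cur < bl.length ∧
          m.contains (PySem.List.pyGetD bl (cur : Int) ' ') = true ∧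
          0 < m.getD (PySem.List.pyGetD bl (cur : Int) ' ') 0 := by
        rw [hget]
        exact ⟨hcurlt, (hk c).mpr hcAsc, hpos⟩
      have hrec := alt_G rest bl (cur + 1) (m.modify c 0 (· - 1))
        (by simp at hlen ⊢; omega) (drop_succ_of_drop hdrop) hb
        (nonneg_modify_dec hpos hn) (keysdig_modify hk hcAsc _)
        (by rw [hdec]; exact digonly_decC hdg c)
        (by rw [hdec]; have := minrep_length_decC hcAsc hG.1; simp at hmlen ⊢; omega)
        (by rw [hdec]; exact hG.2)
      rw [altForward_step hcond, hget] at *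
      rw [hrec, hdec, take_succ_of_drop hdrop]
      simp only [G, if_pos hG]
      simp
    · -- A and B both leave the tight mode here
      have hm0c : m0 < c := by
        rcases hcases with h | ⟨h1, h2⟩
        · exact h
        · exfalso
          subst h1
          exact hG ⟨hm0pos, h2⟩
      obtain ⟨d, hpk⟩ :=
        pickR_isSome (ds := digitsDesc) ((mem_digitsDesc_iff m0).mpr hm0Asc) hm0pos hm0c
      have hdprops := pickR_some hpk
      have hdpos : 0 < m.getD d 0 := pos_getD_of_cnt2f hn hdprops.1
      have hGrw : G (cnt2f m) (c :: rest) = d :: maxrep (decC (cnt2f m) d) := by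
        simp only [G, if_neg hG, hpk]
      by_cases hposc : 0 < cnt2f m c
      · -- forward pass overshoots, backtracking returns to this position
        have hposD : 0 < m.getD c 0 := pos_getD_of_cnt2f hn hposc
        have hdecc := cnt2f_modify_dec hposD
        have hbad : bl.drop (cur + 1) < minrep (decC (cnt2f m) c) := by
          rw [drop_succ_of_drop hdrop]
          exact not_le.mp (fun hcon => hG ⟨hposc, hcon⟩)
        have hlenf0 : (minrep (decC (cnt2f m) c)).length + (cur + 1) = bl.length := by
          have := minrep_length_decC hcAsc hposc
          simp at hmlen hlen
          omega
        have hcond : cur < bl.length ∧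
            m.contains (PySem.List.pyGetD bl (cur : Int) ' ') = true ∧
            0 < m.getD (PySem.List.pyGetD bl (cur : Int) ' ') 0 := by
          rw [hget]
          exact ⟨hcurlt, (hk c).mpr hcAsc, hposD⟩
        have hcnt0 : ∀ x, ((bl.take (cur + 1)).drop (cur + 1)).count x +
            cnt2f (m.modify c 0 (· - 1)) x = decC (cnt2f m) c x := by
          intro x
          rw [drop_take_self, hdecc]
          simp
        obtain ⟨p, mp, heq, hple, hplt, hnp, hkp, hcp⟩ :=
          fwd_over hb (digonly_decC hdg c) hbad hlenf0 rest (cur + 1)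
            (m.modify c 0 (· - 1)) (le_refl _) (by simp at hlen ⊢; omega)
            (drop_succ_of_drop hdrop) (nonneg_modify_dec hposD hn)
            (keysdig_modify hk hcAsc _) hcnt0
        have hforward : altForward bl bl.length m cur = (p, mp) := by
          rw [altForward_step hcond, hget]
          exact heq
        rw [hforward]
        simp only []
        rw [if_neg (by omega)]
        have hdropc : bl.drop cur = c :: bl.drop (cur + 1) := by
          rw [drop_succ_of_drop hdrop]
          exact hdrop
        have hback := back_down hb hdropc hposc hdg hpk hbad (p - (cur + 1)) mp hnp
          (by omega) (by
            intro x
            have := hcp x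
            rwa [show cur + 1 + (p - (cur + 1)) = p from by omega])
        rw [show p = cur + 1 + (p - (cur + 1)) from by omega, hback, hGrw]
      · -- c is not available: the forward pass stops right here
        have hcond : ¬ (cur < bl.length ∧
            m.contains (PySem.List.pyGetD bl (cur : Int) ' ') = true ∧
            0 < m.getD (PySem.List.pyGetD bl (cur : Int) ' ') 0) := by
          rintro ⟨_, _, h3⟩
          rw [hget] at h3
          exact hposc ((cnt2f_pos_iff hn c).mpr h3)
        rw [altForward_stop hcond]
        simp only []
        rw [if_neg (by omega)]
        rw [altBack_some (by rw [hget, altPick_eq hn _ digitsDesc]; exact hpk),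
          altDesc_eq (nonneg_modify_dec hdpos hn), cnt2f_modify_dec hdpos, hGrw]
-- ---------- the three branches of solve / solve_alt ----------
theorem sorted_rev_eq (al : List Char) :
    (PySem.List.sorted al (fun x => x) false).reverse = PySem.List.sorted al (fun x => x) true := by
  have h1 : (PySem.List.sorted al (fun x => x) true).reverse =
      PySem.List.sorted al (fun x => x) false := by
    apply PySem.List.eq_of_perm_of_pairwise_le_of_injective (fun x => x) (fun _ _ h => h)
    · exact ((PySem.List.sorted al (fun x => x) true).reverse_perm.trans
        (PySem.List.sorted_perm al _ true)).trans (PySem.List.sorted_perm al _ false).symm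
    · exact List.pairwise_reverse.mpr (PySem.List.sorted_pairwise_rev al (fun x => x))
    · exact PySem.List.sorted_pairwise al (fun x => x)
  rw [← h1, List.reverse_reverse]

theorem cmapA_counter (al : List Char) :
    al.foldl (fun d i => d.insert i (d.getD i 0 + 1)) PySem.Dict.empty =
      PySem.Dict.counter al := PySem.Dict.foldl_insert_getD_add_one_eq_counter al

theorem cmapA_f (al : List Char) :
    cnt2f (al.foldl (fun d i => d.insert i (d.getD i 0 + 1)) PySem.Dict.empty) =
      fun c => al.count c := by
  funext c
  rw [cmapA_counter]
  simp only [cnt2f, PySem.Dict.getD_counter]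
  exact Int.toNat_natCast _

theorem cmapA_nonneg (al : List Char) :
    NonnegD (al.foldl (fun d i => d.insert i (d.getD i 0 + 1)) PySem.Dict.empty) := by
  intro c
  rw [cmapA_counter]
  simp [PySem.Dict.getD_counter]

theorem getD_foldl_insert_fun (g : Char → Int) :
    ∀ (ds : List Char) (d0 : PySem.Dict Char Int) (x : Char),
      (ds.foldl (fun d c => d.insert c (g c)) d0).getD x 0 =
        if x ∈ ds then g x else d0.getD x 0
  | [], d0, x => by simp
  | e :: r, d0, x => by
    simp only [List.foldl_cons]
    rw [getD_foldl_insert_fun g r (d0.insert e (g e)) x, PySem.Dict.getD_insert]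
    by_cases hxr : x ∈ r
    · simp [hxr, List.mem_cons]
    · by_cases hxe : x = e <;> simp [hxr, hxe]

theorem contains_foldl_insert_fun (g : Char → Int) :
    ∀ (ds : List Char) (d0 : PySem.Dict Char Int) (x : Char),
      (ds.foldl (fun d c => d.insert c (g c)) d0).contains x =
        (decide (x ∈ ds) || d0.contains x)
  | [], d0, x => by simp
  | e :: r, d0, x => by
    simp only [List.foldl_cons]
    rw [contains_foldl_insert_fun g r (d0.insert e (g e)) x, PySem.Dict.contains_insert]
    by_cases hxr : x ∈ r
    · simp [hxr, List.mem_cons]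
    · by_cases hxe : x = e <;> simp [hxr, hxe]

theorem minrep_of_counts (al : List Char) (hdig : ∀ x ∈ al, PySem.Chars.isdigit x = true) :
    minrep (fun c => al.count c) = PySem.List.sorted al (fun x => x) false := by
  symm
  apply PySem.List.sorted_id_eq_of_perm_of_pairwise
  · rw [List.perm_iff_count]
    intro a
    rw [minrep_count]
    by_cases ha : a ∈ digitsAsc
    · rw [if_pos ha]
    · rw [if_neg ha]
      symm
      exact List.count_eq_zero.mpr (fun h => ha (digit_mem a (hdig a h)))
  · exact minrep_pairwise _

-- ---------- the final assembly ----------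
theorem solve_spec : Claim_equal_solve := by
  intro a b hdom hpre
  unfold Spec_solve
  by_cases h1 : a.toList.length < b.toList.length
  · have hA : solve a b =
        String.ofList ((PySem.List.sorted a.toList (fun x => x) false).reverse) := by
      unfold solve
      rw [if_pos h1]
    have hB : solve_alt a b =
        String.ofList (PySem.List.sorted a.toList (fun x => x) true) := by
      unfold solve_alt
      rw [if_pos h1]
    rw [hA, hB, sorted_rev_eq]
  · by_cases h2 : a = b
    · have hA : solve a b = a := by
        unfold solve
        rw [if_neg h1, if_pos h2]
      have hB : solve_alt a b = a := by
        unfold solve_alt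
        rw [if_neg h1, if_pos h2]
      rw [hA, hB]
    · rcases hpre with h | h | hp
      · exact absurd h h1
      · exact absurd h h2
      obtain ⟨hlen, hadig, hbdig, hsle⟩ := hp
      have hbd : ∀ x ∈ b.toList, PySem.Chars.isdigit x = true := List.all_eq_true.mp hbdig
      have had : ∀ x ∈ a.toList, PySem.Chars.isdigit x = true := List.all_eq_true.mp hadig
      -- the initial counts on both sides agree with (count in a)
      set fc : Char → Nat := fun c => a.toList.count c with hfc
      have hcmapf : cnt2f (a.toList.foldl
          (fun d i => d.insert i (d.getD i 0 + 1)) PySem.Dict.empty) = fc := cmapA_f a.toList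
      set cnt0 := digitsAsc.foldl
          (fun d c => d.insert c ((a.toList.count c : Int))) PySem.Dict.empty with hcnt0
      have hcnt0getD : ∀ x, cnt0.getD x 0 =
          if x ∈ digitsAsc then (a.toList.count x : Int) else 0 := by
        intro x
        rw [hcnt0, getD_foldl_insert_fun, PySem.Dict.getD_empty]
      have hcnt0f : cnt2f cnt0 = fc := by
        funext x
        simp only [cnt2f]
        rw [hcnt0getD x]
        by_cases hx : x ∈ digitsAsc
        · rw [if_pos hx, hfc]
          exact Int.toNat_natCast _
        · rw [if_neg hx, hfc]
          have : a.toList.count x = 0 :=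
            List.count_eq_zero.mpr (fun h => hx (digit_mem x (had x h)))
          simp [this]
      have hcnt0n : NonnegD cnt0 := by
        intro x
        rw [hcnt0getD x]
        by_cases hx : x ∈ digitsAsc <;> simp [hx]
      have hcnt0k : KeysDig cnt0 := by
        intro x
        rw [hcnt0, contains_foldl_insert_fun, PySem.Dict.contains_empty]
        simp
      have hdg : DigOnly fc := by
        intro x hx
        rw [hfc]
        exact List.count_eq_zero.mpr (fun h => hx (digit_mem x (had x h)))
      have hminrep : minrep fc = PySem.List.sorted a.toList (fun x => x) false :=
        minrep_of_counts a.toList had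
      have hmlen : (minrep fc).length = b.toList.length := by
        rw [hminrep, PySem.List.length_sorted]
        simpa using hlen
      have hmle : minrep fc ≤ b.toList := by
        rw [hminrep]
        exact (pyLe_iff _ _).mp hsle
      -- A's side
      have hA : solve a b = String.ofList (solveLoop b.toList a.toList.length
          (a.toList.foldl (fun d i => d.insert i (d.getD i 0 + 1)) PySem.Dict.empty)
          false [] 0) := by
        unfold solve
        rw [if_neg h1, if_neg h2]
      have hAG := loop_G b.toList b.toList 0
        (a.toList.foldl (fun d i => d.insert i (d.getD i 0 + 1)) PySem.Dict.empty) []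
        (by simp) List.drop_zero hbd
        (cmapA_nonneg a.toList)
        (by rw [hcmapf]; exact hmlen) (by rw [hcmapf]; exact hmle)
      -- B's side
      have hB : solve_alt a b =
          if (altForward b.toList b.toList.length cnt0 0).1 = b.toList.length then b
          else String.ofList (altBack b.toList (altForward b.toList b.toList.length cnt0 0).2
            (altForward b.toList b.toList.length cnt0 0).1) := by
        unfold solve_alt
        rw [if_neg h1, if_neg h2]
      have hBG := alt_G b.toList b.toList 0 cnt0
        (by simp) List.drop_zero hbd hcnt0n hcnt0k
        (by rw [hcnt0f]; exact hdg)
        (by rw [hcnt0f]; exact hmlen) (by rw [hcnt0f]; exact hmle)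
      rw [hA, hB, hlen, hAG, hcmapf]
      rw [hcnt0f] at hBG
      simp only [List.take_zero, List.nil_append] at hBG ⊢
      by_cases hfull : (altForward b.toList b.toList.length cnt0 0).1 = b.toList.length
      · rw [if_pos hfull]
        rw [if_pos hfull] at hBG
        rw [← hBG]
        exact String.ofList_toList
      · rw [if_neg hfull]
        rw [if_neg hfull] at hBG
        rw [hBG]
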